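-- pv_equiv track=rewrite | github.com/imnotmoon/Algorithms | baekjoon/1946.py | countPassed
-- ===== SOURCE A (Python) =====
-- def countPassed(sortedApplicants) :
--     ret = 1
--     lessThan = sortedApplicants[0][1]
--     for person in sortedApplicants[1:] :
--         if person[1] < lessThan :
--             lessThan = person[1]
--             ret += 1
--     return ret
-- ===== SOURCE B (Python) =====
-- def countPassed(sortedApplicants):
--     m = sortedApplicants[0][1]
--     mins = []
--     for p in sortedApplicants:
--         m = min(m, p[1])
--         mins.append(m)
--     return 1 + sum(1 for a, b in zip(mins, mins[1:]) if b < a)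
-- ===== Notes on version B (the rewrite author's own statement) =====
-- stated objective: alternative
-- what changed: A's single loop that maintains a running minimum and increments a counter is replaced by a two-pass build-table-then-scan: first materialise the prefix-minimum sequence, then count adjacent strict decreases and return 1 plus that count.
import Mathlib
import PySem

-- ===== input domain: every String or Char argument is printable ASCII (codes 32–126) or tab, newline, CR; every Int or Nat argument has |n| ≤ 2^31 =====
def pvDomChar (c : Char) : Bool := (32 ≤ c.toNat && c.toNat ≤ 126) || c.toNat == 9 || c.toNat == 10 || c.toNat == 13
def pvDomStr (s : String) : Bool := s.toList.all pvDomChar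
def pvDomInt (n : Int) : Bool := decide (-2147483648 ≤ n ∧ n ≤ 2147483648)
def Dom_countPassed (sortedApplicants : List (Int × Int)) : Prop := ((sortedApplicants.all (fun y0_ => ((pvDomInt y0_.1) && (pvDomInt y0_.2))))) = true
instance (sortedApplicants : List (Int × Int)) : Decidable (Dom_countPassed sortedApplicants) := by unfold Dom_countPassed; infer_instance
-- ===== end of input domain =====

-- B replaces A's single running-minimum loop by a two-pass structure (build the
-- prefix-minimum table, then count adjacent strict decreases); objective: alternative.

-- ===== PORT A =====
def countPassed (sortedApplicants : List (Int × Int)) : Int :=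
  -- ret = 1; lessThan = sortedApplicants[0][1]; loop over sortedApplicants[1:]
  let lessThan : Int := (PySem.List.pyGetD sortedApplicants 0 (0, 0)).2
  let st := (PySem.List.slice sortedApplicants (some 1) none).foldl
      (fun (s : Int × Int) person =>
        if person.2 < s.2 then (s.1 + 1, person.2) else s) (1, lessThan)
  st.1

-- ===== PORT B =====
def countPassed_alt (sortedApplicants : List (Int × Int)) : Int :=
  -- m = sortedApplicants[0][1]; build mins (prefix minima); count adjacent decreases
  let m0 : Int := (PySem.List.pyGetD sortedApplicants 0 (0, 0)).2
  let mins := (sortedApplicants.foldl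
      (fun (s : List Int × Int) p => (s.1 ++ [min s.2 p.2], min s.2 p.2)) ([], m0)).1
  1 + (mins.zip (mins.drop 1)).foldl
      (fun (c : Int) ab => if ab.2 < ab.1 then c + 1 else c) 0

-- ===== PRECONDITION & SPEC =====
-- A raises IndexError on the empty list (sortedApplicants[0]); B raises there too.
def Pre_countPassed (sortedApplicants : List (Int × Int)) : Prop := sortedApplicants ≠ []
instance (sortedApplicants : List (Int × Int)) : Decidable (Pre_countPassed sortedApplicants) := by unfold Pre_countPassed; infer_instance
def pvWitness_countPassed : (List (Int × Int)) := [(1, 3), (2, 2), (3, 4)]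

def Spec_countPassed (sortedApplicants : List (Int × Int)) (out : Int) : Prop := out = countPassed_alt sortedApplicants
instance (sortedApplicants : List (Int × Int)) (out : Int) : Decidable (Spec_countPassed sortedApplicants out) := by unfold Spec_countPassed; infer_instance

-- ===== CLAIM (what is proved, stated in full; the proofs are below) =====
def Claim_equal_countPassed : Prop := ∀ (sortedApplicants : List (Int × Int)), Dom_countPassed sortedApplicants → Pre_countPassed sortedApplicants → Spec_countPassed sortedApplicants (countPassed sortedApplicants)

-- ===== LEMMAS AND PROOFS =====

/-- The prefix-minimum sequence starting from running minimum `m`. -/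
def pmins (m : Int) : List (Int × Int) → List Int
  | [] => []
  | p :: ps => min m p.2 :: pmins (min m p.2) ps

/-- The number of strict decreases of the running minimum. -/
def dc (m : Int) : List (Int × Int) → Int
  | [] => 0
  | p :: ps => (if p.2 < m then 1 else 0) + dc (min m p.2) ps

lemma bfold_eq (ps : List (Int × Int)) : ∀ (acc : List Int) (m : Int),
    (ps.foldl (fun (s : List Int × Int) p => (s.1 ++ [min s.2 p.2], min s.2 p.2)) (acc, m))
      = (acc ++ pmins m ps, (pmins m ps).getLastD m) := by
  induction ps with
  | nil => intro acc m; simp [pmins]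
  | cons p ps ih =>
    intro acc m
    simp only [List.foldl_cons, ih (acc ++ [min m p.2]) (min m p.2), pmins]
    simp only [Prod.mk.injEq]
    exact ⟨by simp, (List.getLastD_cons).symm⟩

lemma afold_eq (ps : List (Int × Int)) : ∀ (ret m : Int),
    (ps.foldl (fun (s : Int × Int) person =>
        if person.2 < s.2 then (s.1 + 1, person.2) else s) (ret, m)).1
      = ret + dc m ps := by
  induction ps with
  | nil => intro ret m; simp [dc]
  | cons p ps ih =>
    intro ret m
    simp only [List.foldl_cons, dc]
    by_cases h : p.2 < m
    · have hmin : min m p.2 = p.2 := by omega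
      simp [h, ih, hmin]; ring
    · have hmin : min m p.2 = m := by omega
      simp [h, ih, hmin]

lemma zc_eq (ps : List (Int × Int)) : ∀ (m : Int) (c : Int),
    (((m :: pmins m ps).zip (pmins m ps)).foldl
        (fun (c : Int) ab => if ab.2 < ab.1 then c + 1 else c) c)
      = c + dc m ps := by
  induction ps with
  | nil => intro m c; simp [pmins, dc]
  | cons p ps ih =>
    intro m c
    simp only [pmins, dc, List.zip_cons_cons, List.foldl_cons]
    by_cases h : p.2 < m
    · have : min m p.2 = p.2 := by omega
      rw [this] at *
      simp [h, ih]; ring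
    · have hm : min m p.2 = m := by omega
      rw [hm]
      have : ¬ (m < m) := lt_irrefl m
      simp [h, this, ih]

-- ===== VERDICT (by name: the statement is the Claim_ definition above) =====
theorem countPassed_spec : Claim_equal_countPassed := by
  intro xs _ hpre
  match xs with
  | [] => exact absurd rfl hpre
  | x :: rest =>
    show countPassed (x :: rest) = countPassed_alt (x :: rest)
    unfold countPassed countPassed_alt
    simp only [PySem.List.pyGetD_zero_cons, PySem.List.slice_from_one, List.tail_cons,
      List.foldl_cons, min_self, List.nil_append]
    rw [afold_eq]
    have hb := bfold_eq rest [x.2] x.2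
    rw [hb]
    simp only [List.singleton_append, List.drop_succ_cons, List.drop_zero]
    rw [zc_eq]
    ring
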